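-- pv_equiv track=rewrite | github.com/giorgimchedlishvili978/GOA-homework | level 79/homework/homework.py | closest_leap_year
-- ===== SOURCE A (Python) =====
-- def is_leap_year(year):
--     if (year % 4 == 0 and year % 100 != 0) or year % 400 == 0:
--         return "Yes"
--     else:
--         return "No"
--
-- def closest_leap_year(year):
--     if is_leap_year(year) == "No":
--         before = year - 1
--         after = year + 1
--         while not is_leap_year(before) == "Yes":
--             before -= 1
--         while not is_leap_year(after) == "Yes":
--             after += 1
--         if year - before <= after - year:
--             return before
--         else:
--             return after
--     return None
-- ===== SOURCE B (Python) =====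
-- def _is_leap(year):
--     return (year % 4 == 0 and year % 100 != 0) or year % 400 == 0
--
-- def closest_leap_year(year):
--     if _is_leap(year):
--         return None
--     delta = 1
--     while True:
--         if _is_leap(year - delta):
--             return year - delta
--         if _is_leap(year + delta):
--             return year + delta
--         delta += 1
-- ===== Notes on version B (the rewrite author's own statement) =====
-- stated objective: alternative
-- what changed: Replaced the two separate inward while-loops (one descending, one ascending, then a distance comparison) by a single symmetric outward-expanding probe: one loop over a growing delta that tests year-delta before year+delta, so the first hit is the answer and no distance comparison is needed.
import Mathlib
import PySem

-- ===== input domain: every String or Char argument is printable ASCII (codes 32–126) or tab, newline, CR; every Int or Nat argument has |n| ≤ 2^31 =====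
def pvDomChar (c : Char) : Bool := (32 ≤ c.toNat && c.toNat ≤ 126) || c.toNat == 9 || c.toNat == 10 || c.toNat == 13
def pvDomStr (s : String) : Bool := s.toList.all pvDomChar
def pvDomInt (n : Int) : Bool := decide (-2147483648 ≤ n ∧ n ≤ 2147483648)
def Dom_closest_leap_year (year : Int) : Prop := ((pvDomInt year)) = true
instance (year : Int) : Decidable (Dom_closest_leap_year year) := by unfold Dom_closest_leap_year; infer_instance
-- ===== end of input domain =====

-- Alternative decomposition: A searches downward and upward with two separate while-loops and then
-- compares distances; B expands one symmetric delta outward, testing year-delta before year+delta.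
-- The fuel arguments of the loop helpers only make the while-loops total (they are provably never
-- exhausted: every run of 400 consecutive years contains a leap year).

-- ===== PORT A =====
def is_leap_year (year : Int) : String :=
  if (PySem.Int.mod year 4 = 0 ∧ PySem.Int.mod year 100 ≠ 0) ∨ PySem.Int.mod year 400 = 0 then "Yes" else "No"

-- 'while not is_leap_year(before) == "Yes": before -= 1'; fuel bounds the iteration count
def pvWhileDownGo : Nat → Int → Int
  | 0, b => b
  | n + 1, b => if is_leap_year b = "Yes" then b else pvWhileDownGo n (b - 1)

def pvWhileDown (b : Int) : Int := pvWhileDownGo ((b % 400).toNat + 1) b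

-- 'while not is_leap_year(after) == "Yes": after += 1'; fuel bounds the iteration count
def pvWhileUpGo : Nat → Int → Int
  | 0, a => a
  | n + 1, a => if is_leap_year a = "Yes" then a else pvWhileUpGo n (a + 1)

def pvWhileUp (a : Int) : Int := pvWhileUpGo (((400 - a % 400) % 400).toNat + 1) a

def closest_leap_year (year : Int) : Option Int :=
  if is_leap_year year = "No" then
    let before := pvWhileDown (year - 1)
    let after := pvWhileUp (year + 1)
    if year - before ≤ after - year then some before else some after
  else none

-- ===== PORT B =====
def pvIsLeap (year : Int) : Bool :=
  ((PySem.Int.mod year 4 == 0) && (PySem.Int.mod year 100 != 0)) || (PySem.Int.mod year 400 == 0)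

-- the 'while True' probe loop over a growing delta; fuel bounds the iteration count
def pvLoopBGo : Nat → Int → Int → Int
  | 0, year, delta => year - delta
  | n + 1, year, delta =>
    if pvIsLeap (year - delta) then year - delta
    else if pvIsLeap (year + delta) then year + delta
    else pvLoopBGo n year (delta + 1)

def closest_leap_year_alt (year : Int) : Option Int :=
  if pvIsLeap year then none
  else some (pvLoopBGo (((year - 1) % 400).toNat + 1) year 1)

-- ===== PRECONDITION & SPEC =====
def Spec_closest_leap_year (year : Int) (out : Option Int) : Prop := out = closest_leap_year_alt year
instance (year : Int) (out : Option Int) : Decidable (Spec_closest_leap_year year out) := by unfold Spec_closest_leap_year; infer_instance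

-- ===== CLAIM (what is proved, stated in full; the proofs are below) =====
def Claim_equal_closest_leap_year : Prop := ∀ (year : Int), Dom_closest_leap_year year → Spec_closest_leap_year year (closest_leap_year year)

-- ===== LEMMAS AND PROOFS =====

theorem leap_bridge (y : Int) : is_leap_year y = "Yes" ↔ pvIsLeap y = true := by
  simp only [is_leap_year, pvIsLeap, Bool.or_eq_true, Bool.and_eq_true, beq_iff_eq, bne_iff_ne]
  split_ifs with hc
  · simp only [PySem.Int.mod_eq_zero_iff_dvd] at hc
    simpa using hc
  · simp only [ne_eq, PySem.Int.mod_eq_zero_iff_dvd] at hc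
    simp; tauto

theorem leap_no_iff (y : Int) : is_leap_year y = "No" ↔ ¬ is_leap_year y = "Yes" := by
  simp only [is_leap_year]
  split_ifs <;> simp

theorem mod400_ne_of_not_leap (b : Int) (h : ¬ is_leap_year b = "Yes") : b % 400 ≠ 0 := by
  simp only [is_leap_year] at h
  have h400 : PySem.Int.mod b 400 = b % 400 := PySem.Int.mod_eq_emod_of_pos (by norm_num)
  split at h
  · simp at h
  · rename_i hc
    rw [h400] at hc
    tauto

theorem mod400_ne_of_not_leapB (y : Int) (h : ¬ pvIsLeap y = true) : y % 400 ≠ 0 := by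
  intro h0
  exact h ((leap_bridge y).mp (by
    simp only [is_leap_year]
    rw [if_pos (Or.inr (by rw [PySem.Int.mod_eq_emod_of_pos (by norm_num)]; exact h0))]))

theorem pvWhileDownGo_spec (n : Nat) : ∀ b : Int, (b % 400).toNat < n →
    is_leap_year (pvWhileDownGo n b) = "Yes" ∧ pvWhileDownGo n b ≤ b ∧
      ∀ y, pvWhileDownGo n b < y → y ≤ b → ¬ is_leap_year y = "Yes" := by
  induction n with
  | zero => intro b hb; omega
  | succ n ih =>
    intro b hb
    by_cases h : is_leap_year b = "Yes"
    · refine ⟨by simp [pvWhileDownGo, h], by simp [pvWhileDownGo, h], ?_⟩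
      intro y h1 h2
      simp only [pvWhileDownGo, if_pos h] at h1
      omega
    · have hne : b % 400 ≠ 0 := mod400_ne_of_not_leap b h
      have hm : ((b - 1) % 400).toNat < n := by omega
      obtain ⟨l1, l2, l3⟩ := ih (b - 1) hm
      refine ⟨by simpa [pvWhileDownGo, h] using l1, by simp [pvWhileDownGo, h]; omega, ?_⟩
      intro y h1 h2
      simp only [pvWhileDownGo, if_neg h] at h1
      rcases eq_or_lt_of_le h2 with rfl | hlt
      · exact h
      · exact l3 y h1 (by omega)

theorem pvWhileUpGo_spec (n : Nat) : ∀ a : Int, (((400 - a % 400) % 400)).toNat < n →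
    is_leap_year (pvWhileUpGo n a) = "Yes" ∧ a ≤ pvWhileUpGo n a ∧
      ∀ y, a ≤ y → y < pvWhileUpGo n a → ¬ is_leap_year y = "Yes" := by
  induction n with
  | zero => intro a ha; omega
  | succ n ih =>
    intro a ha
    by_cases h : is_leap_year a = "Yes"
    · refine ⟨by simp [pvWhileUpGo, h], by simp [pvWhileUpGo, h], ?_⟩
      intro y h1 h2
      simp only [pvWhileUpGo, if_pos h] at h2
      omega
    · have hne : a % 400 ≠ 0 := mod400_ne_of_not_leap a h
      have hm : (((400 - (a + 1) % 400) % 400)).toNat < n := by omega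
      obtain ⟨l1, l2, l3⟩ := ih (a + 1) hm
      refine ⟨by simpa [pvWhileUpGo, h] using l1, by simp [pvWhileUpGo, h]; omega, ?_⟩
      intro y h1 h2
      simp only [pvWhileUpGo, if_neg h] at h2
      rcases eq_or_lt_of_le h1 with rfl | hlt
      · exact h
      · exact l3 y (by omega) h2

theorem pvLoopBGo_eq (year : Int) (n : Nat) : ∀ delta : Int,
    ((year - delta) % 400).toNat < n →
    1 ≤ delta → delta ≤ year - pvWhileDown (year - 1) → delta ≤ pvWhileUp (year + 1) - year →
    pvLoopBGo n year delta =
      (if year - pvWhileDown (year - 1) ≤ pvWhileUp (year + 1) - year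
       then pvWhileDown (year - 1) else pvWhileUp (year + 1)) := by
  obtain ⟨dl1, dl2, dl3⟩ := pvWhileDownGo_spec (((year - 1) % 400).toNat + 1) (year - 1) (by omega)
  obtain ⟨ul1, ul2, ul3⟩ := pvWhileUpGo_spec (((400 - (year + 1) % 400) % 400).toNat + 1) (year + 1) (by omega)
  have eD : pvWhileDownGo (((year - 1) % 400).toNat + 1) (year - 1) = pvWhileDown (year - 1) := rfl
  have eU : pvWhileUpGo (((400 - (year + 1) % 400) % 400).toNat + 1) (year + 1) = pvWhileUp (year + 1) := rfl
  rw [eD] at dl1 dl2 dl3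
  rw [eU] at ul1 ul2 ul3
  induction n with
  | zero => intro delta hm; omega
  | succ n ih =>
    intro delta hm h1 hd1 hd2
    by_cases hb : delta = year - pvWhileDown (year - 1)
    · have hlp : pvIsLeap (year - delta) = true := by
        rw [← leap_bridge]
        have : year - delta = pvWhileDown (year - 1) := by omega
        rw [this]; exact dl1
      rw [pvLoopBGo, if_pos hlp, if_pos (by omega)]
      omega
    · have hnb : ¬ pvIsLeap (year - delta) = true := by
        rw [← leap_bridge]
        exact dl3 (year - delta) (by omega) (by omega)
      rw [pvLoopBGo, if_neg hnb]
      by_cases ha : delta = pvWhileUp (year + 1) - year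
      · have hlp : pvIsLeap (year + delta) = true := by
          rw [← leap_bridge]
          have : year + delta = pvWhileUp (year + 1) := by omega
          rw [this]; exact ul1
        rw [if_pos hlp, if_neg (by omega)]
        omega
      · have hna : ¬ pvIsLeap (year + delta) = true := by
          rw [← leap_bridge]
          exact ul3 (year + delta) (by omega) (by omega)
        rw [if_neg hna]
        have hne : (year - delta) % 400 ≠ 0 := mod400_ne_of_not_leapB _ hnb
        exact ih (delta + 1) (by omega) (by omega) (by omega) (by omega)

-- ===== VERDICT (by name: the statement is the Claim_ definition above) =====
theorem closest_leap_year_spec : Claim_equal_closest_leap_year := by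
  intro year _
  unfold Spec_closest_leap_year closest_leap_year closest_leap_year_alt
  by_cases hl : is_leap_year year = "Yes"
  · have hno : ¬ is_leap_year year = "No" := by
      intro h; exact ((leap_no_iff year).mp h) hl
    rw [if_neg hno, if_pos ((leap_bridge year).mp hl)]
  · have hno : is_leap_year year = "No" := (leap_no_iff year).mpr hl
    have hnb : ¬ pvIsLeap year = true := fun h => hl ((leap_bridge year).mpr h)
    rw [if_pos hno, if_neg hnb]
    have h1 : 1 ≤ year - pvWhileDown (year - 1) := by
      have := (pvWhileDownGo_spec (((year - 1) % 400).toNat + 1) (year - 1) (by omega)).2.1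
      unfold pvWhileDown; omega
    have h2 : 1 ≤ pvWhileUp (year + 1) - year := by
      have := (pvWhileUpGo_spec (((400 - (year + 1) % 400) % 400).toNat + 1) (year + 1) (by omega)).2.1
      unfold pvWhileUp; omega
    have := pvLoopBGo_eq year (((year - 1) % 400).toNat + 1) 1 (by omega) (by omega) h1 h2
    rw [this]
    show (if year - pvWhileDown (year - 1) ≤ pvWhileUp (year + 1) - year then
        some (pvWhileDown (year - 1)) else some (pvWhileUp (year + 1))) =
      some (if year - pvWhileDown (year - 1) ≤ pvWhileUp (year + 1) - year
        then pvWhileDown (year - 1) else pvWhileUp (year + 1))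
    split_ifs <;> rfl
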